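-- pv_equiv track=rewrite | github.com/yingl/LintCodeInPython | processing-form.py | processing_file
-- ===== SOURCE A (Python) =====
-- from typing import (
--     List,
-- )
--
-- def processing_file(a: List[str]) -> List[str]:
--     # Write your code here
--     ret = []
--     rows = len(a)
--     ls = []
--     for i in range(rows):
--         words = a[i].split(',')
--         for i in range(len(words)):
--             if i >= len(ls):
--                 ls.append(len(words[i]))
--             if len(words[i]) > ls[i]:
--                 ls[i] = len(words[i])
--     for i in range(rows):
--         s = []
--         words = a[i].split(',')
--         for i in range(len(words)):
--             w = words[i]
--             s.append(' ' * (ls[i] - len(w)) + w)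
--         ret.append(','.join(s))
--     return ret
-- ===== SOURCE B (Python) =====
-- def processing_file(a):
--     # Column-major single pass: pad one whole column at a time, no width table.
--     rows = [r.split(',') for r in a]
--     padded = [[] for _ in rows]
--     j = 0
--     while True:
--         col = [f[j] for f in rows if j < len(f)]
--         if not col:
--             return [','.join(p) for p in padded]
--         w = max(len(f) for f in col)
--         padded = [p + [f[j].rjust(w)] if j < len(f) else p
--                   for p, f in zip(padded, rows)]
--         j += 1
-- ===== Notes on version B (the rewrite author's own statement) =====
-- stated objective: alternative
-- what changed: A makes two staged row-wise passes, first merging each row's field lengths into a running-max width list with index tests/appends/in-place updates and then padding every row against that table; B has no width table at all: a single column-major loop extracts column j from all rows, pads that whole column immediately with rjust to its own max, and advances to the next column until a column is empty.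
import Mathlib
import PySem

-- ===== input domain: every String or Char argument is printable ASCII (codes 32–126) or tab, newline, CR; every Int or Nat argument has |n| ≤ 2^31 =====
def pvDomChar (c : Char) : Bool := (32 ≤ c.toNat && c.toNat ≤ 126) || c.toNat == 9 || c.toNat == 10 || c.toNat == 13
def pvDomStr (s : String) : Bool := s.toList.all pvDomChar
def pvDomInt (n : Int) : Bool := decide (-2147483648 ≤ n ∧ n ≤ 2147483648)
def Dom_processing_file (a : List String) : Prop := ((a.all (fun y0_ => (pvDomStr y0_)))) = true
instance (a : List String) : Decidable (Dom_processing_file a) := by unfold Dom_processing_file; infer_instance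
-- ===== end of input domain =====

-- B replaces A's two staged row-wise passes (running-max width list, then padding) by a
-- single column-major loop that pads one whole column at a time, with no width table;
-- objective: alternative decomposition, same cost.

-- ===== PORT A =====
-- s.split(',') — Str.split? is `some` exactly when the separator is nonempty, so getD [] is exact here
def pfSplit (r : String) : List String := (PySem.Str.split? r ",").getD []

-- A's first inner loop: for i in range(len(words)): if i >= len(ls): ls.append(len(words[i])); if len(words[i]) > ls[i]: ls[i] = len(words[i])
def pfMergeGo (ls : List Int) (i : Nat) (rest : List String) : List Int :=
  match rest with
  | [] => ls
  | w :: rest =>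
    let wl := PySem.Str.len w
    let ls1 := if PySem.List.len ls ≤ (i : Int) then ls ++ [wl] else ls
    let ls2 := if wl > PySem.List.pyGetD ls1 (i : Int) 0 then PySem.List.pySetD ls1 (i : Int) wl else ls1
    pfMergeGo ls2 (i + 1) rest

-- ' ' * (ls[i] - len(w)) + w  (negative repeat count gives the empty string, as in Python)
def pfPad (n : Int) (w : String) : String :=
  String.ofList (List.replicate (n - PySem.Str.len w).toNat ' ' ++ w.toList)

-- A's second inner loop, accumulating s
def pfPadGo (ls : List Int) (i : Nat) (rest : List String) (s : List String) : List String :=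
  match rest with
  | [] => s
  | w :: rest => pfPadGo ls (i + 1) rest (s ++ [pfPad (PySem.List.pyGetD ls (i : Int) 0) w])

def processing_file (a : List String) : List String :=
  let ls := a.foldl (fun ls row => pfMergeGo ls 0 (pfSplit row)) []
  a.foldl (fun ret row => ret ++ [PySem.Str.join "," (pfPadGo ls 0 (pfSplit row) [])]) []

-- ===== PORT B =====
-- w.rjust(n)
def pfRjust (w : String) (n : Int) : String :=
  String.ofList (List.replicate (n.toNat - w.toList.length) ' ' ++ w.toList)

-- termination helper for the column loop (cited by its decreasing_by)
lemma pf_le_foldl_max_nat (l : List Nat) : ∀ (m : Nat), m ≤ l.foldl max m ∧ ∀ x ∈ l, x ≤ l.foldl max m := by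
  induction l with
  | nil => simp
  | cons x l ih =>
    intro m
    refine ⟨le_trans (le_max_left m x) (ih (max m x)).1, ?_⟩
    intro y hy
    rcases List.mem_cons.mp hy with rfl | hy
    · exact le_trans (le_max_right m y) (ih (max m y)).1
    · exact (ih (max m x)).2 y hy

-- B's while loop: col = [f[j] for f in rows if j < len(f)]; if not col: return joined padded;
-- w = max(len(f) for f in col); append f[j].rjust(w) to the rows that have a j-th field; j += 1
def pfColLoop (rows : List (List String)) (padded : List (List String)) (j : Nat) : List String :=
  let col := (rows.filter (fun f => decide (j < f.length))).map (fun f => f.getD j "")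
  if hcol : col = [] then padded.map (fun p => PySem.Str.join "," p)
  else
    let w := (PySem.List.max? (col.map PySem.Str.len) (fun x => x)).getD 0
    pfColLoop rows
      (List.zipWith (fun p f => if j < f.length then p ++ [pfRjust (f.getD j "") w] else p) padded rows)
      (j + 1)
termination_by ((rows.map List.length).foldl max 0) - j
decreasing_by
  simp only [col] at hcol
  simp only [List.map_eq_nil_iff, List.filter_eq_nil_iff] at hcol
  push_neg at hcol
  obtain ⟨⟨f, hf⟩, _, hj⟩ := hcol
  have hj' : j < f.length := by simpa using hj
  have := (pf_le_foldl_max_nat (rows.map List.length) 0).2 f.length (List.mem_map_of_mem hf)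
  omega

def processing_file_alt (a : List String) : List String :=
  let rows := a.map pfSplit
  pfColLoop rows (rows.map (fun _ => [])) 0

-- ===== PRECONDITION & SPEC =====
def Spec_processing_file (a : List String) (out : List String) : Prop := out = processing_file_alt a
instance (a : List String) (out : List String) : Decidable (Spec_processing_file a out) := by unfold Spec_processing_file; infer_instance

-- ===== CLAIM (what is proved, stated in full; the proofs are below) =====
def Claim_equal_processing_file : Prop := ∀ (a : List String), Dom_processing_file a → Spec_processing_file a (processing_file a)

-- ===== LEMMAS AND PROOFS =====

-- the reference width table: widths[j] = max length of column j (0 beyond the last column)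
def pfWidths (rows : List (List String)) : List Int :=
  (List.range ((rows.map List.length).foldl max 0)).map (fun j =>
    ((rows.filter (fun r => decide (j < r.length))).map (fun r => PySem.Str.len (r.getD j ""))).foldl max 0)

-- elementwise max of two jagged width lists (the abstract content of A's merge loop)
def pfZm : List Int → List Int → List Int
  | [], ws => ws
  | ls, [] => ls
  | l :: ls, w :: ws => max l w :: pfZm ls ws

lemma pfZm_nil (ls : List Int) : pfZm ls [] = ls := by cases ls <;> rfl

lemma set_append_len (done : List Int) (t : Int) (todo : List Int) (v : Int) :
    (done ++ t :: todo).set done.length v = done ++ v :: todo := by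
  induction done with
  | nil => rfl
  | cons d ds ih => simp [ih]

lemma pfMergeGo_eq (rest : List String) : ∀ (done todo : List Int),
    pfMergeGo (done ++ todo) done.length rest = done ++ pfZm todo (rest.map PySem.Str.len) := by
  induction rest with
  | nil => intro done todo; simp [pfMergeGo, pfZm_nil]
  | cons w rest ih =>
    intro done todo
    cases todo with
    | nil =>
      simp only [List.append_nil]
      have h1 : PySem.List.len done ≤ (done.length : Int) := by
        simp [PySem.List.len_eq]
      have h2 : PySem.List.pyGetD (done ++ [PySem.Str.len w]) (done.length : Int) 0
          = PySem.Str.len w := by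
        simp [PySem.List.pyGetD_natCast, List.getD]
      simp only [pfMergeGo, gt_iff_lt]
      rw [if_pos h1, h2, if_neg (lt_irrefl _)]
      have hx := ih (done ++ [PySem.Str.len w]) []
      simp only [List.append_nil] at hx
      rw [show (done ++ [PySem.Str.len w]).length = done.length + 1 by simp] at hx
      rw [hx]
      simp [pfZm]
    | cons t todo =>
      have h1 : ¬ PySem.List.len (done ++ t :: todo) ≤ (done.length : Int) := by
        simp [PySem.List.len_eq]
      have h2 : PySem.List.pyGetD (done ++ t :: todo) (done.length : Int) 0 = t := by
        simp [PySem.List.pyGetD_natCast, List.getD]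
      simp only [pfMergeGo, gt_iff_lt]
      rw [if_neg h1, h2]
      by_cases hlt : t < PySem.Str.len w
      · rw [if_pos hlt, PySem.List.pySetD_natCast, set_append_len]
        have hx := ih (done ++ [PySem.Str.len w]) todo
        simp only [List.append_assoc, List.cons_append, List.nil_append] at hx
        rw [show (done ++ [PySem.Str.len w]).length = done.length + 1 by simp] at hx
        rw [hx]
        rw [PySem.Str.len_eq] at hlt
        have hwl : (w.toList.length : Int) = (w.length : Int) := by
          simp
        simp [pfZm] <;> omega
      · rw [if_neg hlt]
        have hx := ih (done ++ [t]) todo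
        simp only [List.append_assoc, List.cons_append, List.nil_append] at hx
        rw [show (done ++ [t]).length = done.length + 1 by simp] at hx
        rw [hx]
        rw [PySem.Str.len_eq] at hlt
        have hwl : (w.toList.length : Int) = (w.length : Int) := by
          simp
        simp [pfZm] <;> omega

lemma pfZm_nonneg {ls ws : List Int} (hl : ∀ x ∈ ls, 0 ≤ x) (hw : ∀ x ∈ ws, 0 ≤ x) :
    ∀ x ∈ pfZm ls ws, 0 ≤ x := by
  induction ls generalizing ws with
  | nil => simpa [pfZm]
  | cons l ls ih =>
    cases ws with
    | nil => simpa [pfZm_nil] using hl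
    | cons w ws =>
      intro x hx
      simp only [pfZm, List.mem_cons] at hx
      rcases hx with rfl | hx
      · exact le_max_of_le_left (hl l (by simp))
      · exact ih (fun y hy => hl y (by simp [hy])) (fun y hy => hw y (by simp [hy])) x hx

lemma getD_nonneg {ls : List Int} (h : ∀ x ∈ ls, 0 ≤ x) (j : Nat) : 0 ≤ ls.getD j 0 := by
  rcases lt_or_ge j ls.length with hj | hj
  · rw [List.getD_eq_getElem _ _ hj]; exact h _ (List.getElem_mem hj)
  · rw [List.getD_eq_default _ _ hj]

lemma pfZm_getD {ls ws : List Int} (hl : ∀ x ∈ ls, 0 ≤ x) (hw : ∀ x ∈ ws, 0 ≤ x) (j : Nat) :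
    (pfZm ls ws).getD j 0 = max (ls.getD j 0) (ws.getD j 0) := by
  induction ls generalizing ws j with
  | nil =>
    rw [show pfZm [] ws = ws from rfl, show ([] : List Int).getD j 0 = 0 from rfl,
      max_eq_right (getD_nonneg hw j)]
  | cons l ls ih =>
    cases ws with
    | nil =>
      rw [pfZm_nil, show ([] : List Int).getD j 0 = 0 from rfl,
        max_eq_left (getD_nonneg hl j)]
    | cons w ws =>
      cases j with
      | zero => simp [pfZm]
      | succ j =>
        simp only [pfZm, List.getD_cons_succ]
        exact ih (fun y hy => hl y (by simp [hy])) (fun y hy => hw y (by simp [hy])) j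

-- ls_final characterisation
lemma foldl_pfZm_getD (Ls : List (List Int)) : ∀ (ls : List Int), (∀ x ∈ ls, 0 ≤ x) →
    (∀ l ∈ Ls, ∀ x ∈ l, 0 ≤ x) → ∀ j,
    (Ls.foldl pfZm ls).getD j 0 = Ls.foldl (fun m l => max m (l.getD j 0)) (ls.getD j 0) := by
  induction Ls with
  | nil => intro ls _ _ j; rfl
  | cons l Ls ih =>
    intro ls hls hLs j
    simp only [List.foldl_cons]
    rw [ih _ (pfZm_nonneg hls (hLs l (by simp))) (fun l' hl' => hLs l' (by simp [hl'])),
        pfZm_getD hls (hLs l (by simp))]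

lemma foldl_max_filter (p : List String → Bool) (g q : List String → Int)
    (hg : ∀ r, p r = true → q r = g r) (hq : ∀ r, p r = false → q r = 0)
    (rows : List (List String)) : ∀ (m : Int), 0 ≤ m →
    ((rows.filter p).map g).foldl max m = rows.foldl (fun m r => max m (q r)) m := by
  induction rows with
  | nil => intro m _; rfl
  | cons r rows ih =>
    intro m hm
    by_cases hp : p r = true
    · simp only [List.filter_cons, hp, if_pos, List.map_cons, List.foldl_cons, hg r hp]
      exact ih (max m (g r)) (le_trans hm (le_max_left _ _))
    · have hp' : p r = false := by simpa using hp
      simp only [List.filter_cons, hp', Bool.false_eq_true, if_neg, not_false_iff,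
        List.foldl_cons, hq r hp', max_eq_left hm]
      exact ih m hm

lemma foldl_max_zero (q : List String → Int) (rows : List (List String))
    (h : ∀ r ∈ rows, q r = 0) : rows.foldl (fun m r => max m (q r)) 0 = 0 := by
  induction rows with
  | nil => rfl
  | cons r rows ih =>
    simp only [List.foldl_cons, h r (by simp), max_self]
    exact ih (fun r hr => h r (by simp [hr]))

-- A's second loop, rephrased
def pfPadMap (ls : List Int) (i : Nat) (rest : List String) : List String :=
  match rest with
  | [] => []
  | w :: rest => pfPad (PySem.List.pyGetD ls (i : Int) 0) w :: pfPadMap ls (i + 1) rest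

lemma pfPadGo_eq (rest : List String) : ∀ (ls : List Int) (i : Nat) (s : List String),
    pfPadGo ls i rest s = s ++ pfPadMap ls i rest := by
  induction rest with
  | nil => intro ls i s; simp [pfPadGo, pfPadMap]
  | cons w rest ih => intro ls i s; simp [pfPadGo, pfPadMap, ih]

lemma pfPad_eq_rjust (n : Int) (w : String) : pfPad n w = pfRjust w n := by
  unfold pfPad pfRjust
  have h : (n - PySem.Str.len w).toNat = n.toNat - w.toList.length := by
    rw [PySem.Str.len_eq]; omega
  rw [h]

lemma pyGetD_eq_getD (ls : List Int) (i : Nat) : PySem.List.pyGetD ls (i : Int) 0 = ls.getD i 0 := by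
  simp [PySem.List.pyGetD_natCast]

lemma pfPadMap_congr (ls ws : List Int) (h : ∀ j, ls.getD j 0 = ws.getD j 0)
    (rest : List String) : ∀ i, pfPadMap ls i rest = pfPadMap ws i rest := by
  induction rest with
  | nil => intro i; rfl
  | cons w rest ih =>
    intro i
    have hh := h i
    simp only [List.getD] at hh
    simp [pfPadMap, List.getD, hh, ih]

lemma foldl_append_singleton (f : String → String) (a : List String) :
    ∀ s, a.foldl (fun ret row => ret ++ [f row]) s = s ++ a.map f := by
  induction a with
  | nil => intro s; simp
  | cons x a ih => intro s; simp [ih]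

lemma len_nonneg (w : String) : 0 ≤ PySem.Str.len w := by
  rw [PySem.Str.len_eq]; positivity

lemma getD_map_len (r : List String) (j : Nat) :
    (r.map PySem.Str.len).getD j 0 = if j < r.length then PySem.Str.len (r.getD j "") else 0 := by
  rcases lt_or_ge j r.length with hj | hj
  · rw [List.getD_eq_getElem _ _ (by simpa using hj), List.getElem_map,
      if_pos hj, List.getD_eq_getElem _ _ hj]
  · rw [List.getD_eq_default _ _ (by simpa using hj), if_neg (by omega)]

-- A's output equals the reference "pad row r by the width table pfWidths" map
lemma processing_file_eq_ref (a : List String) :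
    processing_file a
      = (a.map pfSplit).map (fun r => PySem.Str.join "," (pfPadMap (pfWidths (a.map pfSplit)) 0 r)) := by
  unfold processing_file
  set rows := a.map pfSplit with hrows
  set widths := pfWidths rows with hwidths
  have hmerge : ∀ row ls, pfMergeGo ls 0 (pfSplit row) = pfZm ls ((pfSplit row).map PySem.Str.len) := by
    intro row ls
    simpa using pfMergeGo_eq (pfSplit row) [] ls
  set lsF := a.foldl (fun ls row => pfMergeGo ls 0 (pfSplit row)) [] with hlsF
  have hlsF' : lsF = (rows.map (fun r => r.map PySem.Str.len)).foldl pfZm [] := by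
    rw [hrows, List.map_map, List.foldl_map, hlsF]
    congr 1
    funext ls row
    simp only [Function.comp]
    exact hmerge row ls
  set ncols := (rows.map List.length).foldl max 0 with hncols
  have hkey : ∀ j, lsF.getD j 0 = widths.getD j 0 := by
    intro j
    have hnn : ∀ l ∈ rows.map (fun r => r.map PySem.Str.len), ∀ x ∈ l, 0 ≤ x := by
      intro l hl x hx
      simp only [List.mem_map] at hl
      obtain ⟨r, _, rfl⟩ := hl
      simp only [List.mem_map] at hx
      obtain ⟨w, _, rfl⟩ := hx
      exact len_nonneg w
    have hA : lsF.getD j 0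
        = rows.foldl (fun m r => max m ((r.map PySem.Str.len).getD j 0)) 0 := by
      rw [hlsF', foldl_pfZm_getD _ [] (by simp) hnn j]
      simp [List.foldl_map]
    by_cases hj : j < ncols
    · have hwj : widths.getD j 0 = ((rows.filter (fun r => decide (j < r.length))).map
          (fun r => PySem.Str.len (r.getD j ""))).foldl max 0 := by
        rw [hwidths]
        unfold pfWidths
        rw [← hncols, List.getD_eq_getElem _ _ (by simpa using hj)]
        simp
      rw [hA, hwj]
      rw [foldl_max_filter (fun r => decide (j < r.length))
        (fun r => PySem.Str.len (r.getD j "")) (fun r => (r.map PySem.Str.len).getD j 0)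
        (fun r hr => by
          show (r.map PySem.Str.len).getD j 0 = PySem.Str.len (r.getD j "")
          rw [getD_map_len, if_pos (by simpa using hr)])
        (fun r hr => by
          show (r.map PySem.Str.len).getD j 0 = 0
          rw [getD_map_len, if_neg (by simpa using hr)])
        rows 0 le_rfl]
    · have hlen : ∀ r ∈ rows, r.length ≤ ncols := by
        intro r hr
        exact (pf_le_foldl_max_nat (rows.map List.length) 0).2 r.length (List.mem_map_of_mem hr)
      have h1 : widths.getD j 0 = 0 := by
        apply List.getD_eq_default
        rw [hwidths]; unfold pfWidths
        rw [← hncols]; simp; omega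
      have h2 : lsF.getD j 0 = 0 := by
        rw [hA]
        apply foldl_max_zero
        intro r hr
        rw [getD_map_len, if_neg (by have := hlen r hr; omega)]
      rw [h1, h2]
  rw [foldl_append_singleton (fun row => PySem.Str.join "," (pfPadGo lsF 0 (pfSplit row) [])) a,
      List.nil_append, hrows, List.map_map]
  apply List.map_congr_left
  intro row hrow
  simp only [Function.comp]
  rw [pfPadGo_eq, List.nil_append, pfPadMap_congr lsF widths hkey]

-- zipWith over a zipWith with the same right list, pointwise for members of the right list
lemma zipWith_zipWith_right {α β γ δ : Type} (f : γ → β → δ) (g : α → β → γ)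
    (ps : List α) (rs : List β) :
    List.zipWith f (List.zipWith g ps rs) rs = List.zipWith (fun p r => f (g p r) r) ps rs := by
  induction ps generalizing rs with
  | nil => simp
  | cons p ps ih => cases rs with
    | nil => simp
    | cons r rs => simp [ih]

lemma zipWith_congr_right_mem {α β γ : Type} (f f' : α → β → γ) (ps : List α) (rs : List β)
    (h : ∀ p r, r ∈ rs → f p r = f' p r) :
    List.zipWith f ps rs = List.zipWith f' ps rs := by
  induction ps generalizing rs with
  | nil => simp
  | cons p ps ih => cases rs with
    | nil => simp
    | cons r rs =>
      simp only [List.zipWith_cons_cons, h p r (by simp)]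
      rw [ih rs (fun p r hr => h p r (by simp [hr]))]

lemma zipWith_self_map {α β γ : Type} (f : β → α → γ) (g : α → β) (l : List α) :
    List.zipWith f (l.map g) l = l.map (fun r => f (g r) r) := by
  induction l with
  | nil => rfl
  | cons x l ih => simp [ih]

lemma zipWith_join_eq_map (ps : List (List String)) (rs : List (List String))
    (h : ps.length = rs.length) :
    List.zipWith (fun p (_ : List String) => PySem.Str.join "," p) ps rs
      = ps.map (fun p => PySem.Str.join "," p) := by
  induction ps generalizing rs with
  | nil => simp
  | cons p ps ih => cases rs with
    | nil => simp at h
    | cons r rs => simp only [List.zipWith_cons_cons, List.map_cons]; rw [ih rs (by simpa using h)]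

lemma foldl_max_cons_nonneg (x : Int) (t : List Int) (hx : 0 ≤ x) :
    (x :: t).foldl max 0 = t.foldl max x := by
  simp [List.foldl_cons, max_eq_right hx]

-- the invariant of B's column loop
lemma pfColLoop_inv (rows : List (List String)) : ∀ (n j : Nat),
    (rows.map List.length).foldl max 0 ≤ j + n →
    ∀ (padded : List (List String)), padded.length = rows.length →
    pfColLoop rows padded j
      = List.zipWith (fun p r => PySem.Str.join "," (p ++ pfPadMap (pfWidths rows) j (r.drop j)))
          padded rows := by
  intro n
  induction n with
  | zero =>
    intro j hmax padded hlen
    have hall : ∀ r ∈ rows, r.length ≤ j := by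
      intro r hr
      have := (pf_le_foldl_max_nat (rows.map List.length) 0).2 r.length (List.mem_map_of_mem hr)
      omega
    have hcol : (rows.filter (fun f => decide (j < f.length))).map (fun f => f.getD j "") = [] := by
      rw [List.map_eq_nil_iff, List.filter_eq_nil_iff]
      intro f hf
      simp only [decide_eq_true_eq, not_lt]
      exact hall f hf
    rw [pfColLoop.eq_def]
    simp only [hcol, dif_pos]
    rw [zipWith_congr_right_mem _ (fun p (_ : List String) => PySem.Str.join "," p) padded rows
      (fun p r hr => by
        rw [List.drop_eq_nil_of_le (hall r hr)]
        simp [pfPadMap])]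
    rw [zipWith_join_eq_map _ _ hlen]
  | succ n ih =>
    intro j hmax padded hlen
    by_cases hcol : (rows.filter (fun f => decide (j < f.length))).map (fun f => f.getD j "") = []
    · have hall : ∀ r ∈ rows, r.length ≤ j := by
        rw [List.map_eq_nil_iff, List.filter_eq_nil_iff] at hcol
        intro r hr
        simpa using hcol r hr
      have hcol' : (rows.filter (fun f => decide (j < f.length))).map (fun f => f.getD j "") = [] := by
        rw [List.map_eq_nil_iff, List.filter_eq_nil_iff]
        intro f hf
        simpa using hall f hf
      rw [pfColLoop.eq_def]
      simp only [hcol', dif_pos]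
      rw [zipWith_congr_right_mem _ (fun p (_ : List String) => PySem.Str.join "," p) padded rows
        (fun p r hr => by
          rw [List.drop_eq_nil_of_le (hall r hr)]
          simp [pfPadMap])]
      rw [zipWith_join_eq_map _ _ hlen]
    · -- nonempty column: one step
      set col := (rows.filter (fun f => decide (j < f.length))).map (fun f => f.getD j "") with hcoldef
      set w := (PySem.List.max? (col.map PySem.Str.len) (fun x => x)).getD 0 with hwdef
      have hstep : pfColLoop rows padded j
          = pfColLoop rows
              (List.zipWith (fun p f => if j < f.length then p ++ [pfRjust (f.getD j "") w] else p)
                padded rows) (j + 1) := by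
        rw [pfColLoop, dif_neg hcol]
      rw [hstep]
      have hlen' : (List.zipWith (fun p f => if j < f.length then p ++ [pfRjust (f.getD j "") w] else p)
          padded rows).length = rows.length := by
        simp [List.length_zipWith, hlen]
      rw [ih (j + 1) (by omega) _ hlen', zipWith_zipWith_right]
      apply zipWith_congr_right_mem
      intro p r hr
      by_cases hjr : j < r.length
      · -- w = widths.getD j
        have hw_eq : w = (pfWidths rows).getD j 0 := by
          have hnn : ∀ x ∈ col.map PySem.Str.len, 0 ≤ x := by
            intro x hx
            rcases List.mem_map.mp hx with ⟨s, _, rfl⟩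
            exact len_nonneg s
          obtain ⟨x, t, hxt⟩ : ∃ x t, col.map PySem.Str.len = x :: t := by
            cases hc : col.map PySem.Str.len with
            | nil => exact absurd (by simpa using hc) hcol
            | cons x t => exact ⟨x, t, rfl⟩
          have hncols : j < (rows.map List.length).foldl max 0 := by
            have := (pf_le_foldl_max_nat (rows.map List.length) 0).2 r.length (List.mem_map_of_mem hr)
            omega
          have hwj : (pfWidths rows).getD j 0
              = ((rows.filter (fun f => decide (j < f.length))).map
                  (fun f => PySem.Str.len (f.getD j ""))).foldl max 0 := by
            unfold pfWidths
            rw [List.getD_eq_getElem _ _ (by simpa using hncols)]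
            simp
          have hcols_eq : (rows.filter (fun f => decide (j < f.length))).map
              (fun f => PySem.Str.len (f.getD j "")) = col.map PySem.Str.len := by
            rw [hcoldef, List.map_map]
            rfl
          rw [hwdef, hwj, hcols_eq, hxt, PySem.List.max?_id_cons]
          simp only [Option.getD_some]
          rw [foldl_max_cons_nonneg x t (hnn x (by simp [hxt]))]
        rw [if_pos hjr]
        have hdrop : r.drop j = r.getD j "" :: r.drop (j + 1) := by
          rw [List.getD_eq_getElem _ _ hjr, List.drop_eq_getElem_cons hjr]
        rw [hdrop]
        simp only [pfPadMap, pyGetD_eq_getD, List.append_assoc, List.cons_append, List.nil_append]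
        rw [pfPad_eq_rjust, hw_eq]
      · rw [if_neg hjr]
        rw [List.drop_eq_nil_of_le (by omega), List.drop_eq_nil_of_le (by omega)]
        simp [pfPadMap]

-- ===== VERDICT (by name: the statement is the Claim_ definition above) =====
theorem processing_file_spec : Claim_equal_processing_file := by
  intro a _
  unfold Spec_processing_file processing_file_alt
  rw [processing_file_eq_ref]
  set rows := a.map pfSplit with hrows
  rw [pfColLoop_inv rows ((rows.map List.length).foldl max 0) 0 (by omega) _ (by simp)]
  rw [zipWith_self_map]
  simp
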